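-- pv_equiv track=rewrite | github.com/zhongxiangLi/GameDevTools | Tools/Helper.py | getWinPath
-- ===== SOURCE A (Python) =====
-- def getWinPath(varpath):
--     varpath=varpath.replace('//','\\\\').replace('/','\\\\')
--
--     tmpNewPath=""
--     for tmpIndex in range(len(varpath)):
--         if (tmpIndex>0 and varpath[tmpIndex-1]!='\\') and varpath[tmpIndex]=='\\' and (tmpIndex<(len(varpath)-1) and varpath[tmpIndex+1]!='\\'):
--             tmpNewPath=tmpNewPath+'\\'
--         tmpNewPath=tmpNewPath+varpath[tmpIndex]
--
--     return tmpNewPath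
-- ===== SOURCE B (Python) =====
-- def getWinPath(varpath):
--     varpath = varpath.replace('//', '\\\\').replace('/', '\\\\')
--     out = []
--     n = len(varpath)
--     i = 0
--     while i < n:
--         c = varpath[i]
--         if c != '\\':
--             out.append(c)
--             i += 1
--         else:
--             j = i + 1
--             while j < n and varpath[j] == '\\':
--                 j += 1
--             if j - i == 1 and i > 0 and j < n:
--                 out.append('\\\\')
--             else:
--                 out.append('\\' * (j - i))
--             i = j
--     return ''.join(out)
-- ===== Notes on version B (the rewrite author's own statement) =====
-- stated objective: alternative
-- what changed: A checks both neighbours of every index in a per-character loop; B makes a single pass over maximal backslash runs, emitting a doubled backslash only for an interior run of length one.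
import Mathlib
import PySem

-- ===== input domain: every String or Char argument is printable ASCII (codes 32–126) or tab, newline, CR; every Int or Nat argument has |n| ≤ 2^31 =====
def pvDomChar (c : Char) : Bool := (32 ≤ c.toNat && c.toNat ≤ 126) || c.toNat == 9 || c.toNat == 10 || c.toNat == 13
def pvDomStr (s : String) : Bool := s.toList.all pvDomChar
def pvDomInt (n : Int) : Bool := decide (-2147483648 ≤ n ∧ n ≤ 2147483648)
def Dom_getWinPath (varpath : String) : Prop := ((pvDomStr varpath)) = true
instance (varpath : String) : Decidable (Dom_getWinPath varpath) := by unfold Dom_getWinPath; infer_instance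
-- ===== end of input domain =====

-- B replaces A's per-index neighbour-checking loop by a single pass over maximal backslash runs (objective: alternative; same cost).

-- ===== PORT A =====
-- one loop step of A: maybe append the doubling backslash, then append varpath[i]
def stepA (cs : List Char) (acc : List Char) (i : Nat) : List Char :=
  (if (0 < i ∧ cs.getD (i - 1) ' ' ≠ '\\') ∧ cs.getD i ' ' = '\\' ∧
      (i < cs.length - 1 ∧ cs.getD (i + 1) ' ' ≠ '\\')
   then acc ++ ['\\'] else acc) ++ [cs.getD i ' ']

def getWinPath (varpath : String) : String :=
  String.ofList
    ((List.range (PySem.Str.replace (PySem.Str.replace varpath "//" "\\\\") "/" "\\\\").toList.length).foldl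
      (stepA (PySem.Str.replace (PySem.Str.replace varpath "//" "\\\\") "/" "\\\\").toList) [])

-- ===== PORT B =====
-- Source B's while loop: consume one non-backslash char, or one whole run of backslashes
def altGo : Bool → List Char → List Char
  | _, [] => []
  | atStart, c :: rest =>
    if c ≠ '\\' then c :: altGo false rest
    else
      let run := rest.takeWhile (· == '\\')
      let rest' := rest.dropWhile (· == '\\')
      if run.length = 0 ∧ ¬atStart ∧ rest' ≠ [] then
        '\\' :: '\\' :: altGo false rest'
      else
        c :: run ++ altGo false rest'
termination_by _ l => l.length
decreasing_by
  · simp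
  · simp
    exact List.length_dropWhile_le _ _
  · simp
    exact List.length_dropWhile_le _ _

def getWinPath_alt (varpath : String) : String :=
  String.ofList (altGo true (PySem.Str.replace (PySem.Str.replace varpath "//" "\\\\") "/" "\\\\").toList)

-- ===== PRECONDITION & SPEC =====
def Spec_getWinPath (varpath : String) (out : String) : Prop := out = getWinPath_alt varpath
instance (varpath : String) (out : String) : Decidable (Spec_getWinPath varpath out) := by unfold Spec_getWinPath; infer_instance

-- ===== CLAIM (what is proved, stated in full; the proofs are below) =====
def Claim_equal_getWinPath : Prop := ∀ (varpath : String), Dom_getWinPath varpath → Spec_getWinPath varpath (getWinPath varpath)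

-- ===== LEMMAS AND PROOFS =====

-- common characterisation: prev-state recursion; p = "previous char exists and is not a backslash"
-- "the next char exists and is not a backslash"
def nextNB : List Char → Bool
  | d :: _ => decide (d ≠ '\\')
  | [] => false

def specGo : Bool → List Char → List Char
  | _, [] => []
  | p, c :: rest =>
    (if p && (c == '\\') && nextNB rest then ['\\', c] else [c]) ++ specGo (decide (c ≠ '\\')) rest

theorem specGo_indiff (p q : Bool) (l : List Char) (h : l.head? ≠ some '\\') :
    specGo p l = specGo q l := by
  cases l with
  | nil => rfl
  | cons c t =>
    have hc : (c == '\\') = false := by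
      simp only [List.head?] at h
      simp; intro hh; exact h (by rw [hh])
    simp [specGo, nextNB, hc]

theorem head?_dropWhile_bs (l : List Char) :
    (l.dropWhile (· == '\\')).head? ≠ some '\\' := by
  induction l with
  | nil => simp
  | cons c t ih =>
    by_cases hc : c = '\\'
    · have hb : (c == '\\') = true := by simp [hc]
      simpa [List.dropWhile, hb] using ih
    · have hb : (c == '\\') = false := by simp [hc]
      simp [List.dropWhile, hb, hc]

theorem specGo_run (l : List Char) :
    specGo false l = l.takeWhile (· == '\\') ++ specGo false (l.dropWhile (· == '\\')) := by
  induction l with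
  | nil => rfl
  | cons c t ih =>
    by_cases hc : c = '\\'
    · have hb : (c == '\\') = true := by simp [hc]
      simp [specGo, nextNB, List.takeWhile, List.dropWhile, hc, ih]
    · have hb : (c == '\\') = false := by simp [hc]
      simp [specGo, nextNB, List.takeWhile, List.dropWhile, hb, hc]

theorem altGo_nil (atStart : Bool) : altGo atStart [] = [] := by
  rw [altGo]

theorem altGo_cons (atStart : Bool) (c : Char) (rest : List Char) :
    altGo atStart (c :: rest) =
      if c ≠ '\\' then c :: altGo false rest
      else if (rest.takeWhile (· == '\\')).length = 0 ∧ ¬atStart ∧ rest.dropWhile (· == '\\') ≠ [] then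
        '\\' :: '\\' :: altGo false (rest.dropWhile (· == '\\'))
      else c :: rest.takeWhile (· == '\\') ++ altGo false (rest.dropWhile (· == '\\')) := by
  rw [altGo]

theorem altGo_eq_specGo (l : List Char) (atStart : Bool) :
    altGo atStart l = specGo (!atStart) l := by
  match l with
  | [] => rw [altGo_nil]; cases atStart <;> rfl
  | c :: rest =>
    have ih1 := altGo_eq_specGo rest false
    have ih2 := altGo_eq_specGo (rest.dropWhile (· == '\\')) false
    simp only [Bool.not_false] at ih1 ih2
    rw [altGo_cons]
    by_cases hc : c = '\\'
    case neg =>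
      have hb : (c == '\\') = false := by simp [hc]
      simp [hc, ih1, specGo, hb]
    case pos =>
      subst hc
      rw [if_neg (by simp)]
      by_cases hA : (rest.takeWhile (· == '\\')).length = 0 ∧ ¬atStart ∧
          rest.dropWhile (· == '\\') ≠ []
      · rw [if_pos hA]
        obtain ⟨hrun, hA2, hne⟩ := hA
        have hAS : atStart = false := by simpa using hA2
        subst hAS
        have htw : rest.takeWhile (· == '\\') = [] := List.length_eq_zero_iff.mp hrun
        have hdw : rest.dropWhile (· == '\\') = rest := by
          cases rest with
          | nil => rfl
          | cons d t =>
            have hd : (d == '\\') = false := by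
              by_contra h
              simp [List.takeWhile, eq_true_of_ne_false h] at htw
            simp [List.dropWhile, hd]
        rw [hdw] at hne ih2
        obtain ⟨d, t, rfl⟩ : ∃ d t, rest = d :: t := by
          cases rest with
          | nil => exact absurd rfl hne
          | cons d t => exact ⟨d, t, rfl⟩
        have hd : (d == '\\') = false := by
          by_contra h
          simp [List.takeWhile, eq_true_of_ne_false h] at htw
        rw [hdw, ih2, specGo_indiff true false (d :: t) (by simp; simpa using hd)]
        have hd' : ¬ d = '\\' := by simpa using hd
        simp [specGo, nextNB, hd, hd']
      · rw [if_neg hA]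
        have key : specGo (!atStart) ('\\' :: rest) = '\\' :: specGo false rest := by
          cases rest with
          | nil => cases atStart <;> rfl
          | cons d t =>
            cases atStart with
            | true => simp [specGo, nextNB]
            | false =>
              have hrun : ((d :: t).takeWhile (· == '\\')).length ≠ 0 ∨
                  (d :: t).dropWhile (· == '\\') = [] := by
                by_contra h
                push Not at h
                exact hA ⟨h.1, by simp, h.2⟩
              have hd : d = '\\' := by
                rcases hrun with h | h
                · by_contra hdne
                  have hb : (d == '\\') = false := by simp [hdne]
                  simp [List.takeWhile, hb] at h
                · by_contra hdne
                  have hb : (d == '\\') = false := by simp [hdne]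
                  simp [List.dropWhile, hb] at h
              subst hd
              simp [specGo, nextNB]
        rw [key, specGo_run rest,
          specGo_indiff false true (rest.dropWhile (· == '\\')) (head?_dropWhile_bs rest), ← ih2]
        simp
termination_by l.length
decreasing_by
  · simp
  · simpa using Nat.lt_succ_of_le (List.length_dropWhile_le _ _)

def prevB (pre : List Char) : Bool :=
  match pre.getLast? with
  | some d => decide (d ≠ '\\')
  | none => false

theorem getD_append_len (pre : List Char) (c : Char) (suf : List Char) (d : Char) :
    (pre ++ c :: suf).getD pre.length d = c := by
  induction pre with
  | nil => rfl
  | cons a t ih => simpa [List.getD] using ih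

theorem prevB_concat (l : List Char) (a : Char) : prevB (l ++ [a]) = decide (a ≠ '\\') := by
  simp [prevB]

theorem foldA (suf : List Char) : ∀ (pre acc : List Char),
    (List.range' pre.length suf.length).foldl (stepA (pre ++ suf)) acc
      = acc ++ specGo (prevB pre) suf := by
  induction suf with
  | nil => intro pre acc; simp [specGo, nextNB]
  | cons c suf ih =>
    intro pre acc
    simp only [List.length_cons]
    rw [List.range'_succ, List.foldl_cons]
    have hstep := ih (pre ++ [c]) (stepA (pre ++ c :: suf) acc pre.length)
    simp only [List.append_assoc, List.singleton_append, List.length_append, List.length_cons, List.length_nil] at hstep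
    rw [hstep, prevB_concat]
    -- it remains to evaluate one step of A at index pre.length
    have g0 : (pre ++ c :: suf).getD pre.length ' ' = c := getD_append_len pre c suf ' '
    have hlen : (pre ++ c :: suf).length = pre.length + suf.length + 1 := by simp; omega
    show stepA (pre ++ c :: suf) acc pre.length ++ specGo (decide (c ≠ '\\')) suf
        = acc ++ specGo (prevB pre) (c :: suf)
    have hcond : ((0 < pre.length ∧ (pre ++ c :: suf).getD (pre.length - 1) ' ' ≠ '\\') ∧
          (pre ++ c :: suf).getD pre.length ' ' = '\\' ∧
          (pre.length < (pre ++ c :: suf).length - 1 ∧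
            (pre ++ c :: suf).getD (pre.length + 1) ' ' ≠ '\\'))
        ↔ (prevB pre && (c == '\\') &&
            nextNB suf) = true := by
      rcases List.eq_nil_or_concat pre with hpre | ⟨p', lst, rfl⟩
      · subst hpre
        simp [prevB]
      · simp only [List.concat_eq_append] at g0 hlen ⊢
        have gm1 : ((p' ++ [lst]) ++ c :: suf).getD ((p' ++ [lst]).length - 1) ' ' = lst := by
          have : (p' ++ [lst]) ++ c :: suf = p' ++ lst :: (c :: suf) := by simp
          rw [this]
          have : (p' ++ [lst]).length - 1 = p'.length := by simp
          rw [this]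
          exact getD_append_len p' lst (c :: suf) ' '
        rw [gm1, g0, prevB_concat, hlen]
        cases suf with
        | nil => simp [nextNB]
        | cons d t =>
          have g1 : ((p' ++ [lst]) ++ c :: d :: t).getD ((p' ++ [lst]).length + 1) ' ' = d := by
            have e1 : (p' ++ [lst]) ++ c :: d :: t = ((p' ++ [lst]) ++ [c]) ++ d :: t := by simp
            have e2 : (p' ++ [lst]).length + 1 = ((p' ++ [lst]) ++ [c]).length := by simp
            rw [e1, e2]
            exact getD_append_len _ d t ' '
          rw [g1]
          simp only [List.length_cons, List.length_append, List.length_singleton]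
          constructor
          · rintro ⟨⟨-, h1⟩, h2, -, h3⟩
            simp [h1, h2, h3, nextNB]
          · intro h
            simp only [nextNB, Bool.and_eq_true, decide_eq_true_eq, beq_iff_eq] at h
            exact ⟨⟨by omega, h.1.1⟩, h.1.2, by omega, h.2⟩
    unfold stepA
    rw [g0] at hcond
    rw [g0]
    by_cases hT : (prevB pre && (c == '\\') &&
        nextNB suf) = true
    · rw [if_pos (hcond.mpr hT)]
      conv_rhs => rw [specGo]
      rw [if_pos hT]
      simp
    · rw [if_neg (fun h => hT (hcond.mp h))]
      conv_rhs => rw [specGo]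
      rw [if_neg hT]
      simp

-- ===== VERDICT (by name: the statement is the Claim_ definition above) =====
theorem getWinPath_spec : Claim_equal_getWinPath := by
  intro varpath _
  unfold Spec_getWinPath getWinPath getWinPath_alt
  have h := foldA (PySem.Str.replace (PySem.Str.replace varpath "//" "\\\\") "/" "\\\\").toList [] []
  simp only [List.length_nil, List.nil_append] at h
  rw [List.range_eq_range', h, altGo_eq_specGo]
  rfl
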